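-- pv_equiv track=rewrite | github.com/Lammatian/AdventOfCode | 2021/src/day13/input_generator.py | _generate_letter_mappings
-- ===== SOURCE A (Python) =====
-- def _generate_letter_mappings(ascii_alphabet):
--     """
--     Given a multi-line string (parsed as list) with 4x6 ASCII-letters,
--     produce mappings from their string counterparts to their coordinates in
--     ASCII. e.g. given letter L as
--
--     #...
--     #...
--     #...
--     #...
--     #...
--     ####
--
--     this will produce an entry
--
--     'L': {(0, 0), (0, 1), (0, 2), (0, 3), (0, 4), (0, 5), (0, 6), (1, 6),
--     (2, 6), (3, 6)}
--
--     in the output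
--     """
--     mapping = {}
--     for i in range(ord('Z') - ord('A') + 1):
--         letter = chr(ord('A') + i)
--         start_x = 5 * i
--         letter_ascii = [line[start_x:start_x+5] for line in ascii_alphabet]
--         coords = set()
--         for y, line in enumerate(letter_ascii):
--             for x, c in enumerate(line):
--                 if c == '#':
--                     coords.add((x, y))
--
--         mapping[letter] = coords
--
--     return mapping
-- ===== SOURCE B (Python) =====
-- def _generate_letter_mappings(ascii_alphabet):
--     buckets = [set() for _ in range(26)]
--     for y, line in enumerate(ascii_alphabet):
--         for x, c in enumerate(line):
--             if c == '#':
--                 i = x // 5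
--                 if i < 26:
--                     buckets[i].add((x % 5, y))
--     return {chr(ord('A') + i): buckets[i] for i in range(26)}
-- ===== Notes on version B (the rewrite author's own statement) =====
-- stated objective: faster
-- what changed: A makes 26 per-letter passes, slicing every line into a 5-wide window and scanning the slices; B makes one single pass over the whole grid, bucketing each '#' cell by its column block i = x//5 (capped at 26) into a pre-allocated list of 26 coordinate sets, then emits the letter dict from the buckets.
import Mathlib
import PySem

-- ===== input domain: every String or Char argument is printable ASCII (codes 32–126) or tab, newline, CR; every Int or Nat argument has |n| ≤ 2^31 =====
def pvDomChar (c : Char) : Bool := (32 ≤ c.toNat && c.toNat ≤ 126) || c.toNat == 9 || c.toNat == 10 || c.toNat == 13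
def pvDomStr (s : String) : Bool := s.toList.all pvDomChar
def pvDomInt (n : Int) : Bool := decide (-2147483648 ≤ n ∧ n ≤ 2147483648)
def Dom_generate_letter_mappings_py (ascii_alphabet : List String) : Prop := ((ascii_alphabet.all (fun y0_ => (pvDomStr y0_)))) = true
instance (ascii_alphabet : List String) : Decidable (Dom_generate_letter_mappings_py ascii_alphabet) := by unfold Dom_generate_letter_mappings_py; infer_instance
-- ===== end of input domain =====

-- B replaces A's 26 per-letter slicing passes by one single pass over the grid that buckets '#'
-- coordinates by column block (x // 5); alternative decomposition of the same computation.

-- ===== PORT A =====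
-- inner loop body of A: 'if c == '#': coords.add((x, y))'
def pvArowStep (y : Int) (coords : PySem.Set (Int × Int)) (xc : Int × Char) : PySem.Set (Int × Int) :=
  if xc.2 == '#' then PySem.Set.add coords (xc.1, y) else coords

-- one row of A's per-letter scan: 'for x, c in enumerate(line): …'
def pvArow (coords : PySem.Set (Int × Int)) (yline : Int × String) : PySem.Set (Int × Int) :=
  (PySem.List.enumerate yline.2.toList 0).foldl (pvArowStep yline.1) coords

-- body of A's outer loop for one letter index i: slice every line, scan the slices
def pvAletter (ascii_alphabet : List String) (i : Int) : PySem.Set (Int × Int) :=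
  (PySem.List.enumerate
      (ascii_alphabet.map (fun line => PySem.Str.slice line (some (5 * i)) (some (5 * i + 5)))) 0).foldl
    pvArow PySem.Set.empty

def generate_letter_mappings_py (ascii_alphabet : List String) : List (String × List (Int × Int)) :=
  ((PySem.List.pyRange 0 (90 - 65 + 1) 1).foldl
      (fun (mapping : PySem.Dict String (List (Int × Int))) i =>
        mapping.insert (String.ofList [Char.ofNat (65 + i.toNat)]) (pvAletter ascii_alphabet i))
      PySem.Dict.empty).items

-- ===== PORT B =====
-- inner loop body of B: bucket a '#' cell by i = x // 5
def pvBstep (y : Int) (buckets : List (PySem.Set (Int × Int))) (xc : Int × Char) : List (PySem.Set (Int × Int)) :=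
  if xc.2 == '#' then
    let i := PySem.Int.floordiv xc.1 5
    if i < 26 then
      buckets.set i.toNat (PySem.Set.add (buckets.getD i.toNat []) (PySem.Int.mod xc.1 5, y))
    else buckets
  else buckets

-- one row of B's single pass: 'for x, c in enumerate(line): …'
def pvBrow (buckets : List (PySem.Set (Int × Int))) (yline : Int × String) : List (PySem.Set (Int × Int)) :=
  (PySem.List.enumerate yline.2.toList 0).foldl (pvBstep yline.1) buckets

def generate_letter_mappings_py_alt (ascii_alphabet : List String) : List (String × List (Int × Int)) :=
  let buckets :=
    (PySem.List.enumerate ascii_alphabet 0).foldl pvBrow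
      (List.replicate 26 (PySem.Set.empty : PySem.Set (Int × Int)))
  (List.range 26).map (fun i => (String.ofList [Char.ofNat (65 + i)], buckets.getD i []))

-- ===== PRECONDITION & SPEC =====
def Spec_generate_letter_mappings_py (ascii_alphabet : List String) (out : List (String × List (Int × Int))) : Prop := out = generate_letter_mappings_py_alt ascii_alphabet
instance (ascii_alphabet : List String) (out : List (String × List (Int × Int))) : Decidable (Spec_generate_letter_mappings_py ascii_alphabet out) := by unfold Spec_generate_letter_mappings_py; infer_instance

-- ===== CLAIM (what is proved, stated in full; the proofs are below) =====
def Claim_equal_generate_letter_mappings_py : Prop := ∀ (ascii_alphabet : List String), Dom_generate_letter_mappings_py ascii_alphabet → Spec_generate_letter_mappings_py ascii_alphabet (generate_letter_mappings_py ascii_alphabet)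

-- ===== LEMMAS AND PROOFS =====

-- shifting the start of enumerate
theorem pv_enumerate_shift {α : Type} (xs : List α) (a b : Int) :
    PySem.List.enumerate xs (a + b) = (PySem.List.enumerate xs a).map (fun p => (p.1 + b, p.2)) := by
  induction xs generalizing a with
  | nil => simp [PySem.List.enumerate_nil]
  | cons x xs ih =>
      rw [PySem.List.enumerate_cons, PySem.List.enumerate_cons, List.map_cons]
      congr 1
      rw [show a + b + 1 = a + 1 + b by ring]
      exact ih (a + 1)

-- pvBstep preserves the number of buckets
theorem pv_Bfold_length (y : Int) (l : List (Int × Char)) (bs : List (PySem.Set (Int × Int))) :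
    (l.foldl (pvBstep y) bs).length = bs.length := by
  induction l generalizing bs with
  | nil => rfl
  | cons p l ih =>
      simp only [List.foldl_cons]
      rw [ih]
      unfold pvBstep
      dsimp only
      split_ifs <;> simp

theorem pv_Brow_length (bs : List (PySem.Set (Int × Int))) (yl : Int × String) :
    (pvBrow bs yl).length = bs.length := pv_Bfold_length _ _ _

-- bucket k of B's inner fold, as a conditional fold over the same enumerate
theorem pv_LB (cs : List Char) (s : Nat) (bs : List (PySem.Set (Int × Int)))
    (hb : bs.length = 26) (k : Nat) (hk : k < 26) (y : Int) :
    ((PySem.List.enumerate cs (s : Int)).foldl (pvBstep y) bs).getD k []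
      = (PySem.List.enumerate cs (s : Int)).foldl
          (fun acc xc =>
            if xc.2 == '#' && (PySem.Int.floordiv xc.1 5 == (k : Int)) then
              PySem.Set.add acc (PySem.Int.mod xc.1 5, y)
            else acc)
          (bs.getD k []) := by
  induction cs generalizing s bs with
  | nil => simp [PySem.List.enumerate_nil]
  | cons c cs ih =>
      rw [PySem.List.enumerate_cons, List.foldl_cons, List.foldl_cons]
      have hs1 : (s : Int) + 1 = ((s + 1 : Nat) : Int) := by push_cast; ring
      have hflo : PySem.Int.floordiv (s : Int) 5 = ((s / 5 : Nat) : Int) :=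
        PySem.Int.floordiv_natCast s 5
      have hmod : PySem.Int.mod (s : Int) 5 = ((s % 5 : Nat) : Int) :=
        PySem.Int.mod_natCast s 5
      have hget_set_self : ∀ v : PySem.Set (Int × Int), ((bs.set k v).getD k []) = v := by
        intro v; simp [List.getD, hb, hk]
      have hget_set_ne : ∀ (j : Nat) (v : PySem.Set (Int × Int)), j ≠ k →
          ((bs.set j v).getD k []) = bs.getD k [] := by
        intro j v hj; simp [List.getD, hj]
      by_cases hc : c = '#'
      · subst hc
        have hstep : pvBstep y bs ((s : Int), '#') =
            (if s / 5 < 26 then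
              bs.set (s / 5) (PySem.Set.add (bs.getD (s / 5) []) (((s % 5 : Nat) : Int), y))
            else bs) := by
          unfold pvBstep
          dsimp only
          rw [hflo, hmod]
          simp only [beq_self_eq_true, if_true, Int.toNat_natCast]
          congr 1
          simp only [eq_iff_iff]
          constructor <;> intro h <;> exact_mod_cast h
        have hinit :
            (if (((s : Int), '#').2 == '#' && PySem.Int.floordiv ((s : Int), '#').1 5 == (k : Int)) = true then
              PySem.Set.add (bs.getD k []) (PySem.Int.mod ((s : Int), '#').1 5, y)
            else bs.getD k [])
            = (if s / 5 = k then
                PySem.Set.add (bs.getD k []) (((s % 5 : Nat) : Int), y)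
              else bs.getD k []) := by
          rw [hflo, hmod]
          simp only [beq_self_eq_true, Bool.true_and, beq_iff_eq]
          congr 1
          simp only [eq_iff_iff]
          constructor <;> intro h <;> exact_mod_cast h
        rw [hstep, hinit, hs1]
        by_cases hlt : s / 5 < 26
        · by_cases heq : s / 5 = k
          · rw [if_pos hlt, if_pos heq, ih (s + 1) _ (by simp [hb]), heq, hget_set_self]
          · rw [if_pos hlt, if_neg heq, ih (s + 1) _ (by simp [hb]), hget_set_ne _ _ heq]
        · rw [if_neg hlt, if_neg (by omega), ih (s + 1) bs hb]
      · have hstep : pvBstep y bs ((s : Int), c) = bs := by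
          unfold pvBstep; simp [hc]
        have hinit :
            (if (((s : Int), c).2 == '#' && PySem.Int.floordiv ((s : Int), c).1 5 == (k : Int)) = true then
              PySem.Set.add (bs.getD k []) (PySem.Int.mod ((s : Int), c).1 5, y)
            else bs.getD k [])
            = bs.getD k [] := by
          simp [hc]
        rw [hstep, hinit, hs1, ih (s + 1) bs hb]

-- the coordinate list a slice scan produces = the coordinate list the bucket condition selects
theorem pv_listEq (cs : List Char) (k : Nat) (y : Int) :
    ((PySem.List.enumerate ((cs.drop (5 * k)).take 5) 0).filter (fun xc => xc.2 == '#')).map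
        (fun xc => ((xc.1 : Int), y))
      = ((PySem.List.enumerate cs 0).filter
          (fun xc => xc.2 == '#' && (PySem.Int.floordiv xc.1 5 == (k : Int)))).map
          (fun xc => (PySem.Int.mod xc.1 5, y)) := by
  have hsplit : cs = cs.take (5 * k) ++ ((cs.drop (5 * k)).take 5 ++ (cs.drop (5 * k)).drop 5) := by
    rw [List.take_append_drop, List.take_append_drop]
  conv_rhs => rw [hsplit]
  rw [PySem.List.enumerate_append, PySem.List.enumerate_append,
    List.filter_append, List.filter_append, List.map_append, List.map_append]
  have h1 : (PySem.List.enumerate (cs.take (5 * k)) 0).filter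
      (fun xc => xc.2 == '#' && (PySem.Int.floordiv xc.1 5 == (k : Int))) = [] := by
    rw [List.filter_eq_nil_iff]
    intro p hp
    rcases (PySem.List.mem_enumerate_iff _ _ _).mp hp with ⟨j, hj, rfl⟩
    have hj5 : j < 5 * k := lt_of_lt_of_le hj (by simp)
    have hfd : PySem.Int.floordiv ((0 : Int) + (j : Int)) 5 = ((j / 5 : Nat) : Int) := by
      rw [zero_add]; exact PySem.Int.floordiv_natCast j 5
    simp only [Bool.and_eq_true, beq_iff_eq, hfd, not_and]
    intro _
    exact_mod_cast (by omega : ¬ (j / 5 = k))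
  have h3 : (PySem.List.enumerate ((cs.drop (5 * k)).drop 5)
      (0 + ((cs.take (5 * k)).length : Int) + (((cs.drop (5 * k)).take 5).length : Int))).filter
      (fun xc => xc.2 == '#' && (PySem.Int.floordiv xc.1 5 == (k : Int))) = [] := by
    rw [List.filter_eq_nil_iff]
    intro p hp
    rcases (PySem.List.mem_enumerate_iff _ _ _).mp hp with ⟨j, hj, rfl⟩
    have hlen : 5 * k + 5 + 1 ≤ cs.length := by
      have := hj; simp [List.length_drop] at this; omega
    have ha : (cs.take (5 * k)).length = 5 * k := by simp [List.length_take]; omega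
    have hbl : ((cs.drop (5 * k)).take 5).length = 5 := by
      simp [List.length_take, List.length_drop]; omega
    have hx : (0 : Int) + ((cs.take (5 * k)).length : Int) + (((cs.drop (5 * k)).take 5).length : Int) + (j : Int)
        = ((5 * k + 5 + j : Nat) : Int) := by rw [ha, hbl]; push_cast; ring
    simp only [Bool.and_eq_true, beq_iff_eq, not_and, hx]
    intro _
    have h5 : PySem.Int.floordiv ((5 * k + 5 + j : Nat) : Int) 5 = (((5 * k + 5 + j) / 5 : Nat) : Int) :=
      PySem.Int.floordiv_natCast _ 5
    rw [h5]
    exact_mod_cast (by omega : ¬ ((5 * k + 5 + j) / 5 = k))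
  have h2 : ((PySem.List.enumerate ((cs.drop (5 * k)).take 5)
        (0 + ((cs.take (5 * k)).length : Int))).filter
        (fun xc => xc.2 == '#' && (PySem.Int.floordiv xc.1 5 == (k : Int)))).map
        (fun xc => (PySem.Int.mod xc.1 5, y))
      = ((PySem.List.enumerate ((cs.drop (5 * k)).take 5) 0).filter
          (fun xc => xc.2 == '#')).map (fun xc => ((xc.1 : Int), y)) := by
    by_cases hm : (cs.drop (5 * k)).take 5 = []
    · simp [hm, PySem.List.enumerate_nil]
    · have hlen : 5 * k < cs.length := by
        by_contra h
        apply hm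
        have : cs.drop (5 * k) = [] := by
          rw [List.drop_eq_nil_iff]; omega
        simp [this]
      have ha : (cs.take (5 * k)).length = 5 * k := by simp [List.length_take]; omega
      rw [ha, pv_enumerate_shift, List.filter_map, List.map_map]
      have hcond : ∀ p ∈ PySem.List.enumerate ((cs.drop (5 * k)).take 5) 0,
          ((fun xc => xc.2 == '#' && (PySem.Int.floordiv xc.1 5 == (k : Int))) ∘
            (fun p => (p.1 + ((5 * k : Nat) : Int), p.2))) p = (p.2 == '#') := by
        intro p hp
        rcases (PySem.List.mem_enumerate_iff _ _ _).mp hp with ⟨j, hj, rfl⟩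
        have hj5 : j < 5 := lt_of_lt_of_le hj (by simp)
        have hx : (0 : Int) + (j : Int) + ((5 * k : Nat) : Int) = ((j + 5 * k : Nat) : Int) := by
          push_cast; ring
        simp only [Function.comp_apply]
        have h5 : PySem.Int.floordiv ((j + 5 * k : Nat) : Int) 5 = (((j + 5 * k) / 5 : Nat) : Int) :=
          PySem.Int.floordiv_natCast _ 5
        rw [hx, h5]
        have hq : ((j + 5 * k) / 5 : Nat) = k := by omega
        simp [hq]
      rw [List.filter_congr hcond]
      apply List.map_congr_left
      intro p hp
      rcases List.mem_filter.mp hp with ⟨hpm, _⟩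
      rcases (PySem.List.mem_enumerate_iff _ _ _).mp hpm with ⟨j, hj, rfl⟩
      have hj5 : j < 5 := lt_of_lt_of_le hj (by simp)
      have hx : (0 : Int) + (j : Int) + ((5 * k : Nat) : Int) = ((j + 5 * k : Nat) : Int) := by
        push_cast; ring
      simp only [Function.comp_apply]
      have h5 : PySem.Int.mod ((j + 5 * k : Nat) : Int) 5 = (((j + 5 * k) % 5 : Nat) : Int) :=
        PySem.Int.mod_natCast _ 5
      rw [hx, h5]
      have hq : ((j + 5 * k) % 5 : Nat) = j := by omega
      simp [hq]
  rw [h1, h3]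
  simp only [List.map_nil, List.nil_append, List.append_nil]
  exact h2.symm

-- one row: bucket k after B's row pass = A's row scan of the k-th slice
theorem pv_row (r : String) (y : Int) (bs : List (PySem.Set (Int × Int)))
    (hb : bs.length = 26) (k : Nat) (hk : k < 26) :
    (pvBrow bs (y, r)).getD k []
      = pvArow (bs.getD k [])
          (y, PySem.Str.slice r (some (5 * (k : Int))) (some (5 * (k : Int) + 5))) := by
  unfold pvBrow pvArow
  dsimp only
  have hsl : (PySem.Str.slice r (some (5 * (k : Int))) (some (5 * (k : Int) + 5))).toList
      = (r.toList.drop (5 * k)).take 5 := by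
    have h := PySem.List.slice_natCast_add r.toList (5 * k) 5
    rw [PySem.Str.toList_slice, PySem.Chars.slice_eq_listSlice]
    have hc : (5 * (k : Int)) = ((5 * k : Nat) : Int) := by push_cast; ring
    rw [hc]
    exact_mod_cast h
  rw [hsl]
  rw [show (0 : Int) = ((0 : Nat) : Int) from rfl, pv_LB r.toList 0 bs hb k hk y]
  have hBfold :
      (PySem.List.enumerate r.toList ((0 : Nat) : Int)).foldl
        (fun acc xc =>
          if (xc.2 == '#' && (PySem.Int.floordiv xc.1 5 == (k : Int))) = true then
            PySem.Set.add acc (PySem.Int.mod xc.1 5, y)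
          else acc)
        (bs.getD k [])
      = (((PySem.List.enumerate r.toList ((0 : Nat) : Int)).filter
            (fun xc => xc.2 == '#' && (PySem.Int.floordiv xc.1 5 == (k : Int)))).map
            (fun xc => (PySem.Int.mod xc.1 5, y))).foldl PySem.Set.add (bs.getD k []) := by
    rw [PySem.List.foldl_if_eq_foldl_filter
          (fun xc : Int × Char => xc.2 == '#' && (PySem.Int.floordiv xc.1 5 == (k : Int)))
          (fun acc xc => PySem.Set.add acc (PySem.Int.mod xc.1 5, y))]
    rw [List.foldl_map]
  have hAfold :
      (PySem.List.enumerate ((r.toList.drop (5 * k)).take 5) ((0 : Nat) : Int)).foldl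
        (pvArowStep y) (bs.getD k [])
      = (((PySem.List.enumerate ((r.toList.drop (5 * k)).take 5) ((0 : Nat) : Int)).filter
            (fun xc => xc.2 == '#')).map (fun xc => ((xc.1 : Int), y))).foldl
          PySem.Set.add (bs.getD k []) := by
    rw [show pvArowStep y = (fun coords xc =>
          if (xc.2 == '#') = true then PySem.Set.add coords (xc.1, y) else coords) from rfl]
    rw [PySem.List.foldl_if_eq_foldl_filter
          (fun xc : Int × Char => xc.2 == '#')
          (fun acc xc => PySem.Set.add acc (xc.1, y))]
    rw [List.foldl_map]
  rw [hBfold, hAfold]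
  simp only [Nat.cast_zero]
  rw [← pv_listEq r.toList k y]

-- all rows: bucket k of B's full pass = A's per-letter fold started at the same buckets
theorem pv_rows (rows : List String) (s : Int) (bs : List (PySem.Set (Int × Int)))
    (hb : bs.length = 26) (k : Nat) (hk : k < 26) :
    ((PySem.List.enumerate rows s).foldl pvBrow bs).getD k []
      = (PySem.List.enumerate
            (rows.map (fun line => PySem.Str.slice line (some (5 * (k : Int))) (some (5 * (k : Int) + 5)))) s).foldl
          pvArow (bs.getD k []) := by
  induction rows generalizing s bs with
  | nil => simp [PySem.List.enumerate_nil]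
  | cons r rows ih =>
      simp only [List.map_cons, PySem.List.enumerate_cons, List.foldl_cons]
      rw [ih (s + 1) (pvBrow bs (s, r)) (by rw [pv_Brow_length]; exact hb),
        pv_row r s bs hb k hk]

-- ===== VERDICT (by name: the statement is the Claim_ definition above) =====
theorem generate_letter_mappings_py_spec : Claim_equal_generate_letter_mappings_py := by
  intro l _hdom
  unfold Spec_generate_letter_mappings_py generate_letter_mappings_py generate_letter_mappings_py_alt
  have hA :
      ((PySem.List.pyRange 0 (90 - 65 + 1) 1).foldl
          (fun (mapping : PySem.Dict String (List (Int × Int))) i =>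
            mapping.insert (String.ofList [Char.ofNat (65 + i.toNat)]) (pvAletter l i))
          PySem.Dict.empty).items
      = (PySem.Dict.empty : PySem.Dict String (List (Int × Int))).items ++
          (PySem.List.pyRange 0 (90 - 65 + 1) 1).map
            (fun i => (String.ofList [Char.ofNat (65 + i.toNat)], pvAletter l i)) :=
    PySem.Dict.items_foldl_insert_fresh _ _ _ _ (by intro a _; simp) (by decide)
  have hemp : (PySem.Dict.empty : PySem.Dict String (List (Int × Int))).items = [] := rfl
  have hpr : PySem.List.pyRange 0 (90 - 65 + 1) 1 = List.map (Nat.cast : Nat → Int) (List.range 26) := by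
    decide
  rw [hA, hemp, hpr, List.nil_append, List.map_map]
  apply List.map_congr_left
  intro i hi
  have hi26 : i < 26 := List.mem_range.mp hi
  have hbs : (List.replicate 26 (PySem.Set.empty : PySem.Set (Int × Int))).getD i [] = [] := by
    rw [List.getD_eq_getElem?_getD, List.getElem?_replicate, if_pos hi26]
    rfl
  have hrows := pv_rows l 0 (List.replicate 26 (PySem.Set.empty : PySem.Set (Int × Int)))
      (by simp) i hi26
  rw [hbs] at hrows
  have h2 : pvAletter l (i : Int)
      = (List.foldl pvBrow (List.replicate 26 (PySem.Set.empty : PySem.Set (Int × Int)))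
          (PySem.List.enumerate l 0)).getD i [] := by
    unfold pvAletter
    exact hrows.symm
  simp only [Function.comp_apply, Int.toNat_natCast]
  rw [h2]
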